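-- pv_equiv track=rewrite | github.com/dutie/DTAI-Thesis | thesis/detection.py | get_range_of_non_infs
-- ===== SOURCE A (Python) =====
-- def get_range_of_non_infs(inf_ids, test_len):
--     non_inf_gaps = []
--     start_gap = -1
--     end_gap = -1
--     for time_step in range(test_len):
--         if time_step not in inf_ids:
--             if start_gap < 0:
--                 start_gap = time_step
--         else:
--             if start_gap >= 0:
--                 end_gap = time_step
--                 non_inf_gaps.append([start_gap, end_gap])
--                 start_gap, end_gap = -1, -1
--     if test_len - inf_ids[-1] > 1:
--         non_inf_gaps.append([inf_ids[-1]+1, test_len])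
--     return non_inf_gaps
-- ===== SOURCE B (Python) =====
-- def get_range_of_non_infs(inf_ids, test_len):
--     infs = set(inf_ids)
--     inf_positions = [t for t in range(test_len) if t in infs]
--     non_inf_gaps = []
--     prev = -1
--     for p in inf_positions:
--         if p - prev > 1:
--             non_inf_gaps.append([prev + 1, p])
--         prev = p
--     if test_len - inf_ids[-1] > 1:
--         non_inf_gaps.append([inf_ids[-1] + 1, test_len])
--     return non_inf_gaps
-- ===== Notes on version B (the rewrite author's own statement) =====
-- stated objective: faster
-- what changed: Replaces the flag-based edge detector that tests 'time_step not in inf_ids' with a linear scan of the list at every time step by a set built once, extraction of the sparse in-range inf positions, and a difference-based pass over those positions that emits [prev+1, p] whenever p - prev > 1.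
import Mathlib
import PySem

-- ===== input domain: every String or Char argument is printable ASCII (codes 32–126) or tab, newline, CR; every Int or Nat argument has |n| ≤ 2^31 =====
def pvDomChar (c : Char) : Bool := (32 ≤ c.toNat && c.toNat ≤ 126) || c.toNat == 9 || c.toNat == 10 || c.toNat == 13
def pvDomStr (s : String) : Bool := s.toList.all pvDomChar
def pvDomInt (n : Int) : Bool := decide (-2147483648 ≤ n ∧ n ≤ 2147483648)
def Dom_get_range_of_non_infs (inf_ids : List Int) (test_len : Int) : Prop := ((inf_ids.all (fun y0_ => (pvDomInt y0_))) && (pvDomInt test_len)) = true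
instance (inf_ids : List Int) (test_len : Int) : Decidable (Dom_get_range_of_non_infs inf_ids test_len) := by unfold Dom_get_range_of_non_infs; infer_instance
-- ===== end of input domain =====

-- B replaces A's flag-based scan of every time step with a set-indexed extraction of
-- the in-range inf positions followed by a difference-based pass over those positions;
-- return values proved equal for all nonempty inf_ids (both Pythons raise IndexError on []).

-- ===== PORT A =====
-- A's for-loop over range(test_len); state = (non_inf_gaps, start_gap, end_gap)
def pvLoopA (inf_ids : List Int) : List Int → (List (List Int) × Int × Int) → List (List Int) × Int × Int
  | [], st => st
  | t :: ts, st =>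
    pvLoopA inf_ids ts
      (if ¬ inf_ids.contains t then
        (if st.2.1 < 0 then (st.1, t, st.2.2) else st)
      else
        (if st.2.1 ≥ 0 then (st.1 ++ [[st.2.1, t]], -1, -1) else st))

def get_range_of_non_infs (inf_ids : List Int) (test_len : Int) : List (List Int) :=
  match PySem.List.pyGet? inf_ids (-1) with
  | none => (pvLoopA inf_ids (PySem.List.pyRange 0 test_len 1) ([], -1, -1)).1   -- IndexError in Python: excluded by Pre_
  | some last =>
    if test_len - last > 1 then
      (pvLoopA inf_ids (PySem.List.pyRange 0 test_len 1) ([], -1, -1)).1 ++ [[last + 1, test_len]]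
    else
      (pvLoopA inf_ids (PySem.List.pyRange 0 test_len 1) ([], -1, -1)).1

-- ===== PORT B =====
-- B's for-loop over the inf positions; state = (non_inf_gaps, prev)
def pvLoopB : List Int → (List (List Int) × Int) → List (List Int) × Int
  | [], st => st
  | p :: ps, st =>
    pvLoopB ps (if p - st.2 > 1 then (st.1 ++ [[st.2 + 1, p]], p) else (st.1, p))

def pvInfPositions (inf_ids : List Int) (test_len : Int) : List Int :=
  (PySem.List.pyRange 0 test_len 1).filter (fun t => PySem.Set.contains (PySem.Set.ofList inf_ids) t)

def get_range_of_non_infs_alt (inf_ids : List Int) (test_len : Int) : List (List Int) :=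
  match PySem.List.pyGet? inf_ids (-1) with
  | none => (pvLoopB (pvInfPositions inf_ids test_len) ([], -1)).1   -- IndexError in Python: excluded by Pre_
  | some last =>
    if test_len - last > 1 then
      (pvLoopB (pvInfPositions inf_ids test_len) ([], -1)).1 ++ [[last + 1, test_len]]
    else
      (pvLoopB (pvInfPositions inf_ids test_len) ([], -1)).1

-- ===== PRECONDITION & SPEC =====
-- Pre_ excludes only empty inf_ids, where both Pythons raise IndexError at inf_ids[-1].
def Pre_get_range_of_non_infs (inf_ids : List Int) (test_len : Int) : Prop := inf_ids ≠ []
instance (inf_ids : List Int) (test_len : Int) : Decidable (Pre_get_range_of_non_infs inf_ids test_len) := by unfold Pre_get_range_of_non_infs; infer_instance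

def pvWitness_get_range_of_non_infs : List Int × Int := ([2, 4], 7)

def Spec_get_range_of_non_infs (inf_ids : List Int) (test_len : Int) (out : List (List Int)) : Prop := out = get_range_of_non_infs_alt inf_ids test_len
instance (inf_ids : List Int) (test_len : Int) (out : List (List Int)) : Decidable (Spec_get_range_of_non_infs inf_ids test_len out) := by unfold Spec_get_range_of_non_infs; infer_instance

-- ===== CLAIM (what is proved, stated in full; the proofs are below) =====
def Claim_equal_get_range_of_non_infs : Prop := ∀ (inf_ids : List Int) (test_len : Int), Dom_get_range_of_non_infs inf_ids test_len → Pre_get_range_of_non_infs inf_ids test_len → Spec_get_range_of_non_infs inf_ids test_len (get_range_of_non_infs inf_ids test_len)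

-- ===== LEMMAS AND PROOFS =====

lemma pv_ofList_contains (inf_ids : List Int) (a : Int) :
    PySem.Set.contains (PySem.Set.ofList inf_ids) a = inf_ids.contains a := by
  simp [PySem.Set.contains_eq_listContains]

-- Simulation invariant: processing range positions [a, a+n) with A's flag state
-- start_gap = (prev+1 if prev+1 < a else -1) matches B's pass over the filtered
-- positions with state prev, and B's resulting prev stays in [-1, a+n).
lemma pv_loop_sim (inf_ids : List Int) :
    ∀ (n : Nat) (a prev : Int) (gaps : List (List Int)), -1 ≤ prev → prev < a →
      pvLoopA inf_ids (PySem.List.pyRange a (a + n) 1)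
          (gaps, (if prev + 1 < a then prev + 1 else -1), -1)
        = ((pvLoopB ((PySem.List.pyRange a (a + n) 1).filter (fun t => PySem.Set.contains (PySem.Set.ofList inf_ids) t)) (gaps, prev)).1,
           (if (pvLoopB ((PySem.List.pyRange a (a + n) 1).filter (fun t => PySem.Set.contains (PySem.Set.ofList inf_ids) t)) (gaps, prev)).2 + 1 < a + n
            then (pvLoopB ((PySem.List.pyRange a (a + n) 1).filter (fun t => PySem.Set.contains (PySem.Set.ofList inf_ids) t)) (gaps, prev)).2 + 1
            else -1), -1)
      ∧ -1 ≤ (pvLoopB ((PySem.List.pyRange a (a + n) 1).filter (fun t => PySem.Set.contains (PySem.Set.ofList inf_ids) t)) (gaps, prev)).2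
      ∧ (pvLoopB ((PySem.List.pyRange a (a + n) 1).filter (fun t => PySem.Set.contains (PySem.Set.ofList inf_ids) t)) (gaps, prev)).2 < a + n := by
  intro n
  induction n with
  | zero =>
    intro a prev gaps h0 h1
    rw [show a + ((0:Nat):Int) = a by push_cast; ring, PySem.List.pyRange_one_eq_nil le_rfl]
    simp only [List.filter_nil, pvLoopA, pvLoopB]
    exact ⟨trivial, h0, h1⟩
  | succ n ih =>
    intro a prev gaps h0 h1
    have hcons : PySem.List.pyRange a (a + ((n+1:Nat):Int)) 1 = a :: PySem.List.pyRange (a+1) (a + ((n+1:Nat):Int)) 1 :=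
      PySem.List.pyRange_one_cons (by push_cast; omega)
    have hx : a + 1 + (n : Int) = a + ((n+1 : Nat) : Int) := by push_cast; ring
    rw [hcons, List.filter_cons, pv_ofList_contains]
    by_cases hc : inf_ids.contains a
    · -- a is an inf position
      rw [if_pos hc]
      by_cases hlt : prev + 1 < a
      · rw [if_pos hlt]
        simp only [pvLoopA, pvLoopB]
        rw [if_neg (not_not_intro hc), if_pos (by omega : (prev + 1 : Int) ≥ 0),
          if_pos (by omega : a - prev > 1)]
        have := ih (a+1) a (gaps ++ [[prev + 1, a]]) (by omega) (by omega)
        rw [hx] at this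
        rw [show (if (a:Int) + 1 < a + 1 then (a:Int) + 1 else -1) = -1 from if_neg (by omega)] at this
        exact this
      · rw [if_neg hlt]
        simp only [pvLoopA, pvLoopB]
        rw [if_neg (not_not_intro hc), if_neg (by norm_num : ¬ ((-1:Int) ≥ 0)),
          if_neg (by omega : ¬ (a - prev > 1))]
        have := ih (a+1) a gaps (by omega) (by omega)
        rw [hx] at this
        rw [show (if (a:Int) + 1 < a + 1 then (a:Int) + 1 else -1) = -1 from if_neg (by omega)] at this
        exact this
    · -- a is not an inf position
      rw [if_neg hc]
      by_cases hlt : prev + 1 < a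
      · rw [if_pos hlt]
        simp only [pvLoopA]
        rw [if_pos hc, if_neg (by omega : ¬ ((prev + 1 : Int) < 0))]
        have := ih (a+1) prev gaps h0 (by omega)
        rw [hx] at this
        rw [show (if prev + 1 < a + 1 then prev + 1 else -1) = prev + 1 from if_pos (by omega)] at this
        exact this
      · rw [if_neg hlt]
        simp only [pvLoopA]
        rw [if_pos hc, if_pos (by norm_num : ((-1:Int) < 0)),
          show ((gaps, a, (-1:Int)) : List (List Int) × Int × Int) = (gaps, prev + 1, -1) from by
            rw [show a = prev + 1 by omega]]
        have := ih (a+1) prev gaps h0 (by omega)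
        rw [hx] at this
        rw [show (if prev + 1 < a + 1 then prev + 1 else -1) = prev + 1 from if_pos (by omega)] at this
        exact this

lemma pv_main_eq (inf_ids : List Int) (test_len : Int) :
    (pvLoopA inf_ids (PySem.List.pyRange 0 test_len 1) ([], -1, -1)).1
      = (pvLoopB (pvInfPositions inf_ids test_len) ([], -1)).1 := by
  unfold pvInfPositions
  by_cases h : test_len ≤ 0
  · rw [PySem.List.pyRange_one_eq_nil h]
    simp [pvLoopA, pvLoopB]
  · have hn : (0 : Int) + (test_len.toNat : Int) = test_len := by omega
    have := pv_loop_sim inf_ids test_len.toNat 0 (-1) [] (by omega) (by omega)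
    rw [hn] at this
    rw [show (if (-1:Int) + 1 < 0 then (-1:Int) + 1 else -1) = -1 by norm_num] at this
    exact congrArg Prod.fst this.1

-- ===== VERDICT (by name: the statement is the Claim_ definition above) =====
theorem get_range_of_non_infs_spec : Claim_equal_get_range_of_non_infs := by
  intro inf_ids test_len _ _
  unfold Spec_get_range_of_non_infs get_range_of_non_infs get_range_of_non_infs_alt
  rw [pv_main_eq]
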